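-- pv_equiv track=rewrite | github.com/AlessandroBonomo28/advent-of-code-23 | day 10/pt1.py | count_dots_in_path
-- ===== SOURCE A (Python) =====
-- ground_symbol = '.'
--
-- def count_dots_in_path(path,map):
--     total_dots = 0
--     h = len(map)
--     x = 0
--     y = 0
--     for line in map:
--         x=0
--         for c in line:
--             if c == ground_symbol and (x,h-y-1) in path:
--                 total_dots += 1
--             x += 1
--         y+=1
--     return total_dots
-- ===== SOURCE B (Python) =====
-- ground_symbol = '.'
--
-- def count_dots_in_path(path, map):
--     total = 0
--     h = len(map)
--     for (px, py) in set(path):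
--         y = h - py - 1
--         if 0 <= y < h:
--             line = map[y]
--             if 0 <= px < len(line) and line[px] == ground_symbol:
--                 total += 1
--     return total
-- ===== Notes on version B (the rewrite author's own statement) =====
-- stated objective: faster
-- what changed: Instead of scanning every grid cell and testing membership in the path list, B dedupes the path into a set and, for each distinct path point, indexes directly into the grid to test whether that cell is ground.
import Mathlib
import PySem

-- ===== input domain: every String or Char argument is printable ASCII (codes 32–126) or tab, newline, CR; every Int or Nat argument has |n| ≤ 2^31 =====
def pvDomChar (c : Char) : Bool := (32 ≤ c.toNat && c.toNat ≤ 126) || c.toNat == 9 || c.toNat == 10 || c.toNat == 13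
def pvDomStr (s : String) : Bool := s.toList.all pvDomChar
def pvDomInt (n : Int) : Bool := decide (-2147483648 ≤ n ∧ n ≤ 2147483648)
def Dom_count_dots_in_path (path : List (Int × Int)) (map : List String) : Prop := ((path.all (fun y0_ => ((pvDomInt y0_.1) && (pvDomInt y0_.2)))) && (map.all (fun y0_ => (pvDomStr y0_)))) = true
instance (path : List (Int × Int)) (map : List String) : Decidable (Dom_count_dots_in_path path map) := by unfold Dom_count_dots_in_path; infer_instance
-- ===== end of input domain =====

-- B replaces A's full grid scan with a membership test by a single loop over the
-- deduplicated path points that indexes directly into the grid (objective: faster).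

-- ===== PORT A =====
-- Literal port of A: nested loops over the grid with manual x/y counters,
-- testing '(x, h-y-1) in path' at every '.' cell.
def count_dots_in_path (path : List (Int × Int)) (map : List String) : Int :=
  let h : Int := (map.length : Int)
  let r := map.foldl (fun (s : Int × Int) line =>
      let t := line.toList.foldl (fun (t : Int × Int) c =>
          ((if c = '.' ∧ (t.2, h - s.2 - 1) ∈ path then t.1 + 1 else t.1), t.2 + 1))
        (s.1, 0)
      (t.1, s.2 + 1)) (0, 0)
  r.1

-- ===== PORT B =====
-- Literal port of B: iterate over set(path); for each point compute its row index,
-- bounds-check, and look at that single grid cell.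
def count_dots_in_path_alt (path : List (Int × Int)) (map : List String) : Int :=
  let h : Int := (map.length : Int)
  (PySem.Set.ofList path).foldl (fun (total : Int) (p : Int × Int) =>
    let y : Int := h - p.2 - 1
    if 0 ≤ y ∧ y < h then
      match PySem.List.pyGet? map y with
      | some line =>
        if 0 ≤ p.1 ∧ p.1 < PySem.Str.len line then
          match PySem.Str.pyGet? line p.1 with
          | some c => if c = '.' then total + 1 else total
          | none => total
        else total
      | none => total
    else total) 0

-- ===== PRECONDITION & SPEC =====
def Spec_count_dots_in_path (path : List (Int × Int)) (map : List String) (out : Int) : Prop := out = count_dots_in_path_alt path map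
instance (path : List (Int × Int)) (map : List String) (out : Int) : Decidable (Spec_count_dots_in_path path map out) := by unfold Spec_count_dots_in_path; infer_instance

-- ===== CLAIM (what is proved, stated in full; the proofs are below) =====
def Claim_equal_count_dots_in_path : Prop := ∀ (path : List (Int × Int)) (map : List String), Dom_count_dots_in_path path map → Spec_count_dots_in_path path map (count_dots_in_path path map)

-- ===== LEMMAS AND PROOFS =====

-- Row count: dots at positions x' ≥ x of cs whose point (x', v) satisfies q.
def rowCnt (q : Int × Int → Bool) (v : Int) (cs : List Char) (x : Int) : Int :=
  match cs with
  | [] => 0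
  | c :: cs => (if c = '.' ∧ q (x, v) then 1 else 0) + rowCnt q v cs (x + 1)

-- Grid count: rows carry decreasing point-y value v.
def gridCnt (q : Int × Int → Bool) (rows : List String) (v : Int) : Int :=
  match rows with
  | [] => 0
  | r :: rs => rowCnt q v r.toList 0 + gridCnt q rs (v - 1)

-- Whether the (optional) line has a dot at column p.1.
def lineCnt (p : Int × Int) (oline : Option String) : Int :=
  match oline with
  | some line =>
    if 0 ≤ p.1 ∧ p.1 < (line.toList.length : Int) ∧ line.toList[p.1.toNat]? = some '.' then 1 else 0
  | none => 0

-- B's per-point contribution, relative to a row list whose top row has value v.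
def contrib (rows : List String) (v : Int) (p : Int × Int) : Int :=
  lineCnt p (if 0 ≤ v - p.2 then rows[(v - p.2).toNat]? else none)

def sumContrib (rows : List String) (v : Int) (l : List (Int × Int)) : Int :=
  match l with
  | [] => 0
  | p :: l => contrib rows v p + sumContrib rows v l

-- ---- A's foldl = gridCnt ----

theorem inner_foldl (path : List (Int × Int)) (v : Int) :
    ∀ (cs : List Char) (t x : Int),
      cs.foldl (fun (t : Int × Int) c =>
          ((if c = '.' ∧ (t.2, v) ∈ path then t.1 + 1 else t.1), t.2 + 1)) (t, x)
      = (t + rowCnt (fun z => decide (z ∈ path)) v cs x, x + cs.length) := by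
  intro cs
  induction cs with
  | nil => intro t x; simp [rowCnt]
  | cons c cs ih =>
    intro t x
    simp only [List.foldl_cons, rowCnt, ih, Prod.mk.injEq, List.length_cons]
    constructor
    · simp only [decide_eq_true_eq]
      split_ifs <;> ring
    · push_cast; ring

theorem outer_foldl (path : List (Int × Int)) (h : Int) :
    ∀ (rows : List String) (t y : Int),
      (rows.foldl (fun (s : Int × Int) line =>
        let t := line.toList.foldl (fun (t : Int × Int) c =>
            ((if c = '.' ∧ (t.2, h - s.2 - 1) ∈ path then t.1 + 1 else t.1), t.2 + 1))
          (s.1, 0)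
        (t.1, s.2 + 1)) (t, y)).1
      = t + gridCnt (fun z => decide (z ∈ path)) rows (h - y - 1) := by
  intro rows
  induction rows with
  | nil => intro t y; simp [gridCnt]
  | cons r rs ih =>
    intro t y
    simp only [List.foldl_cons, gridCnt]
    rw [inner_foldl path (h - y - 1) r.toList t 0, ih]
    have hv : h - (y + 1) - 1 = h - y - 1 - 1 := by ring
    rw [hv]; ring

theorem A_eq_gridCnt (path : List (Int × Int)) (map : List String) :
    count_dots_in_path path map
      = gridCnt (fun z => decide (z ∈ path)) map ((map.length : Int) - 1) := by
  unfold count_dots_in_path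
  have := outer_foldl path (map.length : Int) map 0 0
  simpa using this

-- ---- counting lemmas ----

theorem rowCnt_congr (q q' : Int × Int → Bool) (hq : ∀ z, q z = q' z) (v : Int) :
    ∀ (cs : List Char) (x : Int), rowCnt q v cs x = rowCnt q' v cs x := by
  intro cs
  induction cs with
  | nil => intro x; rfl
  | cons c cs ih => intro x; simp only [rowCnt, hq, ih]

theorem gridCnt_congr (q q' : Int × Int → Bool) (hq : ∀ z, q z = q' z) :
    ∀ (rows : List String) (v : Int), gridCnt q rows v = gridCnt q' rows v := by
  intro rows
  induction rows with
  | nil => intro v; rfl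
  | cons r rs ih => intro v; simp only [gridCnt, rowCnt_congr q q' hq, ih]

theorem rowCnt_false (v : Int) : ∀ (cs : List Char) (x : Int),
    rowCnt (fun _ => false) v cs x = 0 := by
  intro cs
  induction cs with
  | nil => intro x; rfl
  | cons c cs ih => intro x; simp [rowCnt, ih]

theorem gridCnt_false : ∀ (rows : List String) (v : Int),
    gridCnt (fun _ => false) rows v = 0 := by
  intro rows
  induction rows with
  | nil => intro v; rfl
  | cons r rs ih => intro v; simp [gridCnt, rowCnt_false, ih]

theorem rowCnt_add (q q1 q2 : Int × Int → Bool)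
    (hq : ∀ z, (if q z then (1 : Int) else 0) = (if q1 z then 1 else 0) + (if q2 z then 1 else 0))
    (v : Int) : ∀ (cs : List Char) (x : Int),
    rowCnt q v cs x = rowCnt q1 v cs x + rowCnt q2 v cs x := by
  intro cs
  induction cs with
  | nil => intro x; simp [rowCnt]
  | cons c cs ih =>
    intro x
    simp only [rowCnt, ih]
    have hz := hq (x, v)
    by_cases hc : c = '.'
    · simp only [hc, true_and]
      split_ifs at hz ⊢ <;> omega
    · simp only [hc, false_and, if_false]
      ring

theorem gridCnt_add (q q1 q2 : Int × Int → Bool)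
    (hq : ∀ z, (if q z then (1 : Int) else 0) = (if q1 z then 1 else 0) + (if q2 z then 1 else 0)) :
    ∀ (rows : List String) (v : Int),
    gridCnt q rows v = gridCnt q1 rows v + gridCnt q2 rows v := by
  intro rows
  induction rows with
  | nil => intro v; simp [gridCnt]
  | cons r rs ih =>
    intro v
    simp only [gridCnt, ih, rowCnt_add q q1 q2 hq]
    ring

-- A single point is counted by a row scan at most once, exactly at its own cell.
theorem rowCnt_single (p : Int × Int) (v : Int) :
    ∀ (cs : List Char) (x : Int),
    rowCnt (fun z => decide (z = p)) v cs x
      = if p.2 = v ∧ 0 ≤ p.1 - x ∧ p.1 - x < (cs.length : Int) ∧ cs[(p.1 - x).toNat]? = some '.'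
        then 1 else 0 := by
  intro cs
  induction cs with
  | nil =>
    intro x
    simp only [rowCnt, List.length_nil]
    rw [if_neg]
    intro hcond
    have h1 := hcond.2.1
    have h2 := hcond.2.2.1
    simp only [Nat.cast_zero] at h2
    omega
  | cons c cs ih =>
    intro x
    simp only [rowCnt, ih, decide_eq_true_eq]
    by_cases hp : (x, v) = p
    · have hx1 : p.1 = x := by rw [← hp]
      have hp2 : p.2 = v := by rw [← hp]
      have hQ : ¬ (p.2 = v ∧ 0 ≤ p.1 - (x + 1) ∧ p.1 - (x + 1) < (cs.length : Int) ∧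
          cs[(p.1 - (x + 1)).toNat]? = some '.') := by
        intro hh
        have := hh.2.1
        omega
      rw [if_neg hQ, add_zero]
      have hg : (c :: cs)[(p.1 - x).toNat]? = some c := by
        have h0 : (p.1 - x).toNat = 0 := by omega
        rw [h0]; rfl
      by_cases hc : c = '.'
      · rw [if_pos ⟨hc, hp⟩, if_pos ⟨hp2, by omega,
          by simp only [List.length_cons, Nat.cast_add, Nat.cast_one]; omega,
          by rw [hg, hc]⟩]
      · have hA : ¬ (c = '.' ∧ (x, v) = p) := fun hh => hc hh.1
        have hR : ¬ (p.2 = v ∧ 0 ≤ p.1 - x ∧ p.1 - x < ((c :: cs).length : Int) ∧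
            (c :: cs)[(p.1 - x).toNat]? = some '.') := by
          intro hh
          rw [hg] at hh
          exact hc (Option.some.inj hh.2.2.2)
        rw [if_neg hA, if_neg hR]
    · have hA : ¬ (c = '.' ∧ (x, v) = p) := fun hh => hp hh.2
      rw [if_neg hA, zero_add]
      apply if_congr _ rfl rfl
      constructor
      · rintro ⟨h1, h2, h3, h4⟩
        refine ⟨h1, by omega,
          by simp only [List.length_cons, Nat.cast_add, Nat.cast_one]; omega, ?_⟩
        have ht : (p.1 - x).toNat = (p.1 - (x + 1)).toNat + 1 := by omega
        rw [ht, List.getElem?_cons_succ]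
        exact h4
      · rintro ⟨h1, h2, h3, h4⟩
        have hx : p.1 ≠ x := by
          intro he
          exact hp (Prod.ext_iff.mpr ⟨he.symm, h1.symm⟩)
        have h3' : p.1 - x < (cs.length : Int) + 1 := by
          simp only [List.length_cons, Nat.cast_add, Nat.cast_one] at h3
          omega
        refine ⟨h1, by omega, by omega, ?_⟩
        have ht : (p.1 - x).toNat = (p.1 - (x + 1)).toNat + 1 := by omega
        rw [ht, List.getElem?_cons_succ] at h4
        exact h4

theorem contrib_shift (r : String) (rs : List String) (v : Int) (p : Int × Int)
    (hne : p.2 ≠ v) : contrib (r :: rs) v p = contrib rs (v - 1) p := by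
  unfold contrib
  by_cases hle : 0 ≤ v - p.2
  · have hpos : 0 ≤ v - 1 - p.2 := by omega
    have ht : (v - p.2).toNat = (v - 1 - p.2).toNat + 1 := by omega
    rw [if_pos hle, if_pos hpos, ht, List.getElem?_cons_succ]
  · rw [if_neg hle, if_neg (by omega)]

theorem gridCnt_single (p : Int × Int) :
    ∀ (rows : List String) (v : Int),
    gridCnt (fun z => decide (z = p)) rows v = contrib rows v p := by
  intro rows
  induction rows with
  | nil =>
    intro v
    simp only [gridCnt, contrib, List.getElem?_nil]
    have hnone : (if 0 ≤ v - p.2 then (none : Option String) else none) = none := by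
      split <;> rfl
    rw [hnone]
    rfl
  | cons r rs ih =>
    intro v
    simp only [gridCnt, ih]
    rw [rowCnt_single]
    by_cases hp2 : p.2 = v
    · have hcz : contrib rs (v - 1) p = 0 := by
        unfold contrib
        rw [if_neg (show ¬ (0 : Int) ≤ v - 1 - p.2 by omega)]
        rfl
      rw [hcz, add_zero]
      unfold contrib
      rw [if_pos (show (0 : Int) ≤ v - p.2 by omega)]
      have h0 : (v - p.2).toNat = 0 := by omega
      rw [h0]
      simp only [List.getElem?_cons_zero, lineCnt, sub_zero, hp2]
      simp
    · have hA : ¬ (p.2 = v ∧ 0 ≤ p.1 - 0 ∧ p.1 - 0 < (r.toList.length : Int) ∧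
          r.toList[(p.1 - 0).toNat]? = some '.') := fun hh => hp2 hh.1
      rw [if_neg hA, zero_add, contrib_shift r rs v p hp2]

theorem gridCnt_mem_eq_sum (rows : List String) (v : Int) :
    ∀ (l : List (Int × Int)), l.Nodup →
      gridCnt (fun z => decide (z ∈ l)) rows v = sumContrib rows v l := by
  intro l
  induction l with
  | nil =>
    intro _
    rw [gridCnt_congr _ (fun _ => false) (by simp)]
    simp [gridCnt_false, sumContrib]
  | cons p l ih =>
    intro hnd
    have hpl : p ∉ l := (List.nodup_cons.mp hnd).1
    have hl : l.Nodup := (List.nodup_cons.mp hnd).2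
    rw [gridCnt_add (fun z => decide (z ∈ p :: l)) (fun z => decide (z = p))
          (fun z => decide (z ∈ l))]
    · rw [gridCnt_single, ih hl]; rfl
    · intro z
      by_cases h1 : z = p
      · subst h1; simp [hpl]
      · by_cases h2 : z ∈ l <;> simp [h1, h2]

-- ---- B's foldl = sumContrib ----

theorem bstep_eq (map : List String) (p : Int × Int) (total : Int) :
    (let y : Int := (map.length : Int) - p.2 - 1
     if 0 ≤ y ∧ y < (map.length : Int) then
       match PySem.List.pyGet? map y with
       | some line =>
         if 0 ≤ p.1 ∧ p.1 < PySem.Str.len line then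
           match PySem.Str.pyGet? line p.1 with
           | some c => if c = '.' then total + 1 else total
           | none => total
         else total
       | none => total
     else total)
    = total + contrib map ((map.length : Int) - 1) p := by
  simp only []
  unfold contrib
  have hv : (map.length : Int) - 1 - p.2 = (map.length : Int) - p.2 - 1 := by ring
  rw [hv]
  set y : Int := (map.length : Int) - p.2 - 1 with hy
  by_cases hguard : 0 ≤ y ∧ y < (map.length : Int)
  · rw [if_pos hguard, if_pos hguard.1]
    have hlt : y.toNat < map.length := by omega
    have hget : PySem.List.pyGet? map y = some map[y.toNat] := by
      rw [PySem.List.pyGet?_of_nonneg map hguard.1]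
      exact List.getElem?_eq_getElem hlt
    rw [hget, List.getElem?_eq_getElem hlt]
    simp only [lineCnt]
    set line := map[y.toNat] with hline
    by_cases hx : 0 ≤ p.1 ∧ p.1 < (line.toList.length : Int)
    · have hxl : p.1.toNat < line.toList.length := by omega
      have hcg : PySem.Str.pyGet? line p.1 = some line.toList[p.1.toNat] := by
        simp only [PySem.Str.pyGet?_eq, PySem.Chars.pyGet?_eq_listPyGet?]
        rw [PySem.List.pyGet?_of_nonneg _ hx.1]
        exact List.getElem?_eq_getElem hxl
      rw [if_pos (show 0 ≤ p.1 ∧ p.1 < PySem.Str.len line by rw [PySem.Str.len_eq]; exact hx),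
          hcg]
      simp only []
      have hce : line.toList[p.1.toNat]? = some line.toList[p.1.toNat] :=
        List.getElem?_eq_getElem hxl
      by_cases hc : line.toList[p.1.toNat] = '.'
      · rw [if_pos hc, if_pos ⟨hx.1, hx.2, by rw [hce, hc]⟩]
      · rw [if_neg hc, if_neg (show ¬ (0 ≤ p.1 ∧ p.1 < (line.toList.length : Int) ∧
            line.toList[p.1.toNat]? = some '.') by
          intro hcon
          rw [hce] at hcon
          exact hc (Option.some.inj hcon.2.2))]
        ring
    · rw [if_neg (show ¬ (0 ≤ p.1 ∧ p.1 < PySem.Str.len line) by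
          rw [PySem.Str.len_eq]; exact hx),
          if_neg (show ¬ (0 ≤ p.1 ∧ p.1 < (line.toList.length : Int) ∧
            line.toList[p.1.toNat]? = some '.') from fun hcon => hx ⟨hcon.1, hcon.2.1⟩)]
      ring
  · rw [if_neg hguard]
    by_cases h0 : 0 ≤ y
    · have hge : map.length ≤ y.toNat := by omega
      rw [if_pos h0, List.getElem?_eq_none hge]
      simp only [lineCnt]
      ring
    · rw [if_neg h0]
      simp only [lineCnt]
      ring

theorem B_fold (map : List String) :
    ∀ (l : List (Int × Int)) (t : Int),
      l.foldl (fun (total : Int) (p : Int × Int) =>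
        let y : Int := (map.length : Int) - p.2 - 1
        if 0 ≤ y ∧ y < (map.length : Int) then
          match PySem.List.pyGet? map y with
          | some line =>
            if 0 ≤ p.1 ∧ p.1 < PySem.Str.len line then
              match PySem.Str.pyGet? line p.1 with
              | some c => if c = '.' then total + 1 else total
              | none => total
            else total
          | none => total
        else total) t
      = t + sumContrib map ((map.length : Int) - 1) l := by
  intro l
  induction l with
  | nil => intro t; simp [sumContrib]
  | cons p l ih =>
    intro t
    rw [List.foldl_cons, ih, sumContrib]
    rw [bstep_eq map p t]
    ring

theorem B_eq_sum (path : List (Int × Int)) (map : List String) :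
    count_dots_in_path_alt path map
      = sumContrib map ((map.length : Int) - 1) (PySem.Set.ofList path) := by
  unfold count_dots_in_path_alt
  simpa using B_fold map (PySem.Set.ofList path) 0

-- ===== VERDICT (by name: the statement is the Claim_ definition above) =====
theorem count_dots_in_path_spec : Claim_equal_count_dots_in_path := by
  intro path map _
  unfold Spec_count_dots_in_path
  rw [A_eq_gridCnt, B_eq_sum]
  rw [gridCnt_congr _ (fun z => decide (z ∈ PySem.Set.ofList path))
        (by intro z; simp [PySem.Set.mem_ofList])]
  exact gridCnt_mem_eq_sum map _ (PySem.Set.ofList path) (PySem.Set.nodup_ofList path)
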